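-- pv_equiv track=rewrite | github.com/ZJLab-ZBZX/File_Comparison | comparison_modules/latex_comparison/batch_compare.py | gen_color_list
-- ===== SOURCE A (Python) =====
-- def gen_color_list(num=10, gap=15):
--     num += 1
--     single_num = 255 // gap + 1
--     max_num = single_num ** 3
--     num = min(num, max_num)
--     color_list = []
--     for idx in range(num):
--         R = idx // single_num**2
--         GB = idx % single_num**2
--         G = GB // single_num
--         B = GB % single_num
--
--         color_list.append((R*gap, G*gap, B*gap))
--     return color_list[1:]
-- ===== SOURCE B (Python) =====
-- def gen_color_list(num=10, gap=15):
--     single_num = 255 // gap + 1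
--     n = min(num + 1, single_num ** 3)
--     out = []
--     for R in range(single_num):
--         if len(out) >= n:
--             break
--         for G in range(single_num):
--             if len(out) >= n:
--                 break
--             for B in range(single_num):
--                 if len(out) >= n:
--                     break
--                 out.append((R * gap, G * gap, B * gap))
--     return out[1:]
-- ===== Notes on version B (the rewrite author's own statement) =====
-- stated objective: alternative
-- what changed: B iterates the three colour channels directly with nested loops that stop once enough tuples are collected, instead of A's single flat index loop that decodes each index into channels with // and %.
import Mathlib
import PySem

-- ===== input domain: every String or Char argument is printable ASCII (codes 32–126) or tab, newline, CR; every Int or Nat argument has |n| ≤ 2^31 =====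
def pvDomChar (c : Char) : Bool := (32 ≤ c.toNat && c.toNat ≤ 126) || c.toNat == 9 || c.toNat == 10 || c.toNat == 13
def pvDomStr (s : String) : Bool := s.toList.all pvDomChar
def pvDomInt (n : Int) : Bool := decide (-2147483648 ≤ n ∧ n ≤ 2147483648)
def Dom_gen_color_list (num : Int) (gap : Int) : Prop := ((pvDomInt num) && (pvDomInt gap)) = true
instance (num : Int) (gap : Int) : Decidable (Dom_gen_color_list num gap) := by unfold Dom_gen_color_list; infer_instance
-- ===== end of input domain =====

-- B iterates the colour channels with nested loops instead of decoding a flat index; same cost, different decomposition.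

-- ===== PORT A =====
-- A: flat loop over range(num), decoding each idx into (R,G,B) with // and %.
def gen_color_list (num : Int) (gap : Int) : List (Int × Int × Int) :=
  let num1 := num + 1
  let single_num := PySem.Int.floordiv 255 gap + 1
  let max_num := single_num ^ 3
  let n := min num1 max_num
  let color_list := (PySem.List.pyRange 0 n 1).foldl (fun acc idx =>
    let R := PySem.Int.floordiv idx (single_num ^ 2)
    let GB := PySem.Int.mod idx (single_num ^ 2)
    let G := PySem.Int.floordiv GB single_num
    let B := PySem.Int.mod GB single_num
    acc ++ [(R * gap, G * gap, B * gap)]) []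
  PySem.List.slice color_list (some 1) none

-- ===== PORT B =====
-- B-side helpers: the three nested channel loops, each breaking once len(out) ≥ n.
def bLoop3 (n : Int) (gap : Int) (R G : Int) (bs : List Int)
    (acc : List (Int × Int × Int)) : List (Int × Int × Int) :=
  match bs with
  | [] => acc
  | b :: rest =>
    if n ≤ (acc.length : Int) then acc
    else bLoop3 n gap R G rest (acc ++ [(R * gap, G * gap, b * gap)])

def bLoop2 (n : Int) (gap : Int) (R : Int) (bs gs : List Int)
    (acc : List (Int × Int × Int)) : List (Int × Int × Int) :=
  match gs with
  | [] => acc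
  | g :: rest =>
    if n ≤ (acc.length : Int) then acc
    else bLoop2 n gap R bs rest (bLoop3 n gap R g bs acc)

def bLoop1 (n : Int) (gap : Int) (bs rs : List Int)
    (acc : List (Int × Int × Int)) : List (Int × Int × Int) :=
  match rs with
  | [] => acc
  | r :: rest =>
    if n ≤ (acc.length : Int) then acc
    else bLoop1 n gap bs rest (bLoop2 n gap r bs bs acc)

def gen_color_list_alt (num : Int) (gap : Int) : List (Int × Int × Int) :=
  let single_num := PySem.Int.floordiv 255 gap + 1
  let n := min (num + 1) (single_num ^ 3)
  let rng := PySem.List.pyRange 0 single_num 1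
  let out := bLoop1 n gap rng rng []
  PySem.List.slice out (some 1) none

-- ===== PRECONDITION & SPEC =====
-- Pre_ excludes only gap = 0, where Python's 255 // gap raises ZeroDivisionError.
def Pre_gen_color_list (num : Int) (gap : Int) : Prop := gap ≠ 0
instance (num : Int) (gap : Int) : Decidable (Pre_gen_color_list num gap) := by
  unfold Pre_gen_color_list; infer_instance
def pvWitness_gen_color_list : Int × Int := (10, 15)

def Spec_gen_color_list (num : Int) (gap : Int) (out : List (Int × Int × Int)) : Prop := out = gen_color_list_alt num gap
instance (num : Int) (gap : Int) (out : List (Int × Int × Int)) : Decidable (Spec_gen_color_list num gap out) := by unfold Spec_gen_color_list; infer_instance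

-- ===== CLAIM (what is proved, stated in full; the proofs are below) =====
def Claim_equal_gen_color_list : Prop := ∀ (num : Int) (gap : Int), Dom_gen_color_list num gap → Pre_gen_color_list num gap → Spec_gen_color_list num gap (gen_color_list num gap)

-- ===== LEMMAS AND PROOFS =====

-- foldl-append is map
theorem foldl_append_map {α β : Type} (f : α → β) (l : List α) (init : List β) :
    l.foldl (fun acc x => acc ++ [f x]) init = init ++ l.map f := by
  induction l generalizing init with
  | nil => simp
  | cons x xs ih => simp [List.foldl, ih]

-- Nat product enumeration
theorem range_mul_pair (a b : Nat) :
    (List.range (a*b)).map (fun i => (i / b, i % b)) =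
      (List.range a).flatMap (fun x => (List.range b).map (fun y => (x, y))) := by
  induction a with
  | zero => simp
  | succ a ih =>
    have h1 : (a+1)*b = a*b + b := by ring
    rw [h1, List.range_add, List.map_append, ih, List.range_succ, List.flatMap_append]
    simp only [List.map_map, List.flatMap_cons, List.flatMap_nil, List.append_nil]
    congr 1
    apply List.map_congr_left
    intro y hy
    have hyb : y < b := List.mem_range.mp hy
    have hb : 0 < b := by omega
    have hd : (a * b + y) / b = a := by
      rw [Nat.add_comm, Nat.mul_comm a b, Nat.add_mul_div_left _ _ hb, Nat.div_eq_of_lt hyb]; omega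
    have hm : (a * b + y) % b = y := by
      rw [Nat.add_comm, Nat.mul_comm a b, Nat.add_mul_mod_self_left, Nat.mod_eq_of_lt hyb]
    simp [hd, hm]

-- Nat cube enumeration
theorem range_cube_triple (k : Nat) :
    (List.range (k^3)).map (fun i => (i / k^2, i % k^2 / k, i % k^2 % k)) =
      (List.range k).flatMap (fun r => (List.range k).flatMap (fun g =>
        (List.range k).map (fun b => (r, g, b)))) := by
  have h3 : k^3 = k * k^2 := by ring
  have h2 : k^2 = k * k := by ring
  have base := range_mul_pair k (k^2)
  have step :
      (List.range (k^3)).map (fun i => (i / k^2, i % k^2 / k, i % k^2 % k)) =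
        ((List.range (k * k^2)).map (fun i => (i / k^2, i % k^2))).map
          (fun p => (p.1, p.2 / k, p.2 % k)) := by
    rw [h3, List.map_map]; rfl
  rw [step, base, List.map_flatMap]
  apply List.flatMap_congr  -- may not exist; fallback below
  intro r _
  rw [List.map_map]
  have inner := range_mul_pair k k
  have : (List.range (k^2)).map (fun y => (r, y / k, y % k)) =
      ((List.range (k * k)).map (fun y => (y / k, y % k))).map (fun p => (r, p.1, p.2)) := by
    rw [h2, List.map_map]; rfl
  show (List.range (k^2)).map (fun y => (r, y / k, y % k)) = _
  rw [this, inner, List.map_flatMap]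
  simp only [List.map_map, Function.comp_def]

theorem bLoop3_eq (n gap R G : Int) (bs : List Int) (acc : List (Int × Int × Int)) :
    bLoop3 n gap R G bs acc =
      acc ++ (bs.map (fun b => (R * gap, G * gap, b * gap))).take (n.toNat - acc.length) := by
  induction bs generalizing acc with
  | nil => simp [bLoop3]
  | cons b rest ih =>
    rw [bLoop3]
    split
    · next h =>
      have : n.toNat - acc.length = 0 := by omega
      simp [this]
    · next h =>
      rw [ih]
      have h1 : n.toNat - acc.length = (n.toNat - (acc.length + 1)) + 1 := by omega
      simp only [List.map_cons, h1, List.take_succ_cons, List.length_append,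
        List.length_cons, List.length_nil, List.append_assoc, List.cons_append,
        List.nil_append, Nat.zero_add]

theorem bLoop2_eq (n gap R : Int) (bs gs : List Int) (acc : List (Int × Int × Int)) :
    bLoop2 n gap R bs gs acc =
      acc ++ (gs.flatMap (fun g => bs.map (fun b => (R * gap, g * gap, b * gap)))).take
        (n.toNat - acc.length) := by
  induction gs generalizing acc with
  | nil => simp [bLoop2]
  | cons g rest ih =>
    rw [bLoop2]
    split
    · next h =>
      have : n.toNat - acc.length = 0 := by omega
      simp [this]
    · next h =>
      rw [ih, bLoop3_eq, List.flatMap_cons, List.take_append]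
      have hlen : (acc ++ (List.take (n.toNat - acc.length)
          (List.map (fun b => (R * gap, g * gap, b * gap)) bs))).length =
          acc.length + min (n.toNat - acc.length) bs.length := by
        simp
      rw [hlen, List.append_assoc]
      have hidx : n.toNat - (acc.length + min (n.toNat - acc.length) bs.length) =
          n.toNat - acc.length - bs.length := by omega
      rw [List.length_map, hidx]

theorem bLoop1_eq (n gap : Int) (bs rs : List Int) (acc : List (Int × Int × Int)) :
    bLoop1 n gap bs rs acc =
      acc ++ (rs.flatMap (fun r => bs.flatMap (fun g =>
        bs.map (fun b => (r * gap, g * gap, b * gap))))).take (n.toNat - acc.length) := by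
  induction rs generalizing acc with
  | nil => simp [bLoop1]
  | cons r rest ih =>
    rw [bLoop1]
    split
    · next h =>
      have : n.toNat - acc.length = 0 := by omega
      simp [this]
    · next h =>
      rw [ih, bLoop2_eq, List.flatMap_cons, List.take_append]
      have hlen : (acc ++ (List.take (n.toNat - acc.length)
          (List.flatMap (fun g => List.map (fun b => (r * gap, g * gap, b * gap)) bs) bs))).length =
          acc.length + min (n.toNat - acc.length)
            (List.flatMap (fun g => List.map (fun b => (r * gap, g * gap, b * gap)) bs) bs).length := by
        simp
      rw [hlen, List.append_assoc]
      have hidx : n.toNat - (acc.length +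
          min (n.toNat - acc.length)
            (List.flatMap (fun g => List.map (fun b => (r * gap, g * gap, b * gap)) bs) bs).length) =
          n.toNat - acc.length -
            (List.flatMap (fun g => List.map (fun b => (r * gap, g * gap, b * gap)) bs) bs).length := by
        omega
      rw [hidx]

theorem foldA_eq (gap s n : Int) :
    (PySem.List.pyRange 0 n 1).foldl (fun acc idx =>
      acc ++ [(PySem.Int.floordiv idx (s ^ 2) * gap,
        PySem.Int.floordiv (PySem.Int.mod idx (s ^ 2)) s * gap,
        PySem.Int.mod (PySem.Int.mod idx (s ^ 2)) s * gap)]) [] =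
    (PySem.List.pyRange 0 n 1).map (fun idx =>
      (PySem.Int.floordiv idx (s ^ 2) * gap,
       PySem.Int.floordiv (PySem.Int.mod idx (s ^ 2)) s * gap,
       PySem.Int.mod (PySem.Int.mod idx (s ^ 2)) s * gap)) := by
  rw [foldl_append_map]; simp

theorem cube_int (k : Nat) (gap : Int) :
    ((List.range k).map (fun j => (Nat.cast j : Int))).flatMap (fun R =>
      ((List.range k).map (fun j => (Nat.cast j : Int))).flatMap (fun G =>
        ((List.range k).map (fun j => (Nat.cast j : Int))).map (fun b => (R * gap, G * gap, b * gap)))) =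
    (List.range (k ^ 3)).map (fun i =>
      (((i / k ^ 2 : Nat) : Int) * gap, ((i % k ^ 2 / k : Nat) : Int) * gap,
        ((i % k ^ 2 % k : Nat) : Int) * gap)) := by
  have h := congrArg (List.map (fun p : Nat × Nat × Nat =>
      ((p.1 : Int) * gap, (p.2.1 : Int) * gap, (p.2.2 : Int) * gap))) (range_cube_triple k)
  simp only [List.map_map, List.map_flatMap, Function.comp_def] at h
  simp only [List.flatMap_map, List.map_map, Function.comp_def]
  exact h.symm

theorem core_eq (gap s n : Int) (hn : n ≤ s ^ 3) :
    (PySem.List.pyRange 0 n 1).map (fun idx =>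
      (PySem.Int.floordiv idx (s ^ 2) * gap,
       PySem.Int.floordiv (PySem.Int.mod idx (s ^ 2)) s * gap,
       PySem.Int.mod (PySem.Int.mod idx (s ^ 2)) s * gap)) =
    ((PySem.List.pyRange 0 s 1).flatMap (fun R =>
      (PySem.List.pyRange 0 s 1).flatMap (fun G =>
        (PySem.List.pyRange 0 s 1).map (fun b => (R * gap, G * gap, b * gap))))).take n.toNat := by
  by_cases hs : s ≤ 0
  · -- s ≤ 0 : both sides empty
    have hs3 : s ^ 3 ≤ 0 := by
      have h2 : 0 ≤ s ^ 2 := sq_nonneg s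
      have : s ^ 3 = s * s ^ 2 := by ring
      rw [this]
      exact mul_nonpos_of_nonpos_of_nonneg hs h2
    have hrs : PySem.List.pyRange 0 s 1 = [] := by
      simp only [PySem.List.pyRange_one]
      simp
      omega
    have hrn : PySem.List.pyRange 0 n 1 = [] := by
      simp only [PySem.List.pyRange_one]
      simp
      omega
    simp [hrs, hrn]
  · -- 0 < s
    replace hs : 0 < s := by omega
    have hk : ((s.toNat : Int)) = s := Int.toNat_of_nonneg (le_of_lt hs)
    set k := s.toNat with hkdef
    have hrs : PySem.List.pyRange 0 s 1 = (List.range k).map (fun j => (Nat.cast j : Int)) := by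
      rw [PySem.List.pyRange_one]
      simp [hkdef]
    have hrn : PySem.List.pyRange 0 n 1 = (List.range n.toNat).map (fun j => (Nat.cast j : Int)) := by
      rw [PySem.List.pyRange_one]
      simp
    rw [hrs, hrn, cube_int, List.map_map, ← List.map_take, List.take_range]
    have hmin : min n.toNat (k ^ 3) = n.toNat := by
      have : (k : Int) ^ 3 = s ^ 3 := by rw [hk]
      have hle : n ≤ ((k ^ 3 : Nat) : Int) := by push_cast; rw [hk] at *; omega
      omega
    rw [hmin]
    apply List.map_congr_left
    intro i _
    have h2 : (s ^ 2) = ((k ^ 2 : Nat) : Int) := by push_cast; rw [hk]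
    simp only [Function.comp_def, h2, PySem.Int.floordiv_natCast, PySem.Int.mod_natCast]
    rw [← hk]
    simp only [PySem.Int.floordiv_natCast, PySem.Int.mod_natCast]

-- ===== VERDICT (by name: the statement is the Claim_ definition above) =====
theorem gen_color_list_spec : Claim_equal_gen_color_list := by
  intro num gap _ _
  unfold Spec_gen_color_list
  simp only [gen_color_list, gen_color_list_alt]
  rw [foldA_eq, bLoop1_eq,
    core_eq gap (PySem.Int.floordiv 255 gap + 1)
      (min (num + 1) ((PySem.Int.floordiv 255 gap + 1) ^ 3)) (min_le_right _ _)]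
  simp
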